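-- pv_equiv track=rewrite | github.com/rosstex/broadband-mapping-dataset | calculate_statistics.py | get_urban_rural_count_per_code
-- ===== SOURCE A (Python) =====
-- from collections import defaultdict
--
-- def get_urban_rural_count_per_code(rows, blocks_rural_classification):
-- 	counts = {'U': 0, 'R': 0}
-- 	counts_per_block = defaultdict(lambda:0)
-- 	for row in rows:
-- 		block = row[0]
-- 		count = row[1]
--
-- 		urban_or_rural = blocks_rural_classification[block]
-- 		counts[urban_or_rural] += count
-- 		counts_per_block[block] += count
-- 	return counts, counts_per_block
-- ===== SOURCE B (Python) =====
-- from collections import defaultdict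
--
-- def get_urban_rural_count_per_code(rows, blocks_rural_classification):
--     counts_per_block = defaultdict(lambda: 0)
--     for block, count in rows:
--         counts_per_block[block] += count
--     tagged = [(blocks_rural_classification[block], total)
--               for block, total in counts_per_block.items()]
--     counts = {'U': sum(t for c, t in tagged if c == 'U'),
--               'R': sum(t for c, t in tagged if c == 'R')}
--     return counts, counts_per_block
-- ===== Notes on version B (the rewrite author's own statement) =====
-- stated objective: alternative
-- what changed: B first groups counts per distinct block, then classifies each distinct block once into a tagged list and computes the U/R totals as two filtered sums over that list, instead of A's single row loop mutating both dicts.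
import Mathlib
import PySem

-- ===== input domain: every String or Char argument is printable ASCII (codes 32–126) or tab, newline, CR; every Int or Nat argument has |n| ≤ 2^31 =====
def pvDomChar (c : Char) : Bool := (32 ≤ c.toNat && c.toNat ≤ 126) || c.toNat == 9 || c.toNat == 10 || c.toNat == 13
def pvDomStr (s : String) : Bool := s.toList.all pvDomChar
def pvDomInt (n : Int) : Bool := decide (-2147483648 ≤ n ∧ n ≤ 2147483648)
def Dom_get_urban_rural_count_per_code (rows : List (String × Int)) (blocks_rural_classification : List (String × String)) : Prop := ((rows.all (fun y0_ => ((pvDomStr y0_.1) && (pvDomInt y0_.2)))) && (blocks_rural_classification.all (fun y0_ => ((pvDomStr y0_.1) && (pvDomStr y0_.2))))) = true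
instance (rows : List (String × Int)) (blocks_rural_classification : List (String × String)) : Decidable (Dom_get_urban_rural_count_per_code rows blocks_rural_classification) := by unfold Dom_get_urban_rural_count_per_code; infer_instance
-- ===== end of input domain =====

-- B groups counts per distinct block first, then classifies each distinct block once into a
-- tagged list and computes the U/R totals as two filtered sums over that list (alternative
-- decomposition; A is one row loop mutating both dicts).

-- ===== PORT A =====
-- the single loop of A: classification lookup and counts[ur] lookup can raise KeyError → none
def pvA_loop (cls : PySem.Dict String String) :
    List (String × Int) → PySem.Dict String Int → PySem.Dict String Int →
    Option (PySem.Dict String Int × PySem.Dict String Int)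
  | [], counts, cpb => some (counts, cpb)
  | (block, count) :: rest, counts, cpb =>
    match cls.get? block with
    | none => none
    | some ur =>
      match counts.get? ur with
      | none => none
      | some v =>
          pvA_loop cls rest (counts.insert ur (v + count))
            (cpb.insert block (cpb.getD block 0 + count))

def get_urban_rural_count_per_code (rows : List (String × Int)) (blocks_rural_classification : List (String × String)) : (List (String × Int)) × (List (String × Int)) :=
  match pvA_loop (PySem.Dict.ofList blocks_rural_classification) rows
      (PySem.Dict.ofList [("U", 0), ("R", 0)]) PySem.Dict.empty with
  | some (counts, cpb) => (counts.items, cpb.items)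
  | none => ([], [])

-- ===== PORT B =====
-- pass 1: counts_per_block[block] += count
def pvB_cpb (rows : List (String × Int)) : PySem.Dict String Int :=
  rows.foldl (fun d p => d.insert p.1 (d.getD p.1 0 + p.2)) PySem.Dict.empty

-- pass 2: the tagged-list comprehension; a missing block raises KeyError → none
def pvB_tag (cls : PySem.Dict String String) :
    List (String × Int) → Option (List (String × Int))
  | [] => some []
  | (block, total) :: rest =>
    match cls.get? block, pvB_tag cls rest with
    | some c, some xs => some ((c, total) :: xs)
    | _, _ => none

-- pass 3: sum(t for c, t in tagged if c == tag)
def pvB_sumTag (tag : String) (tagged : List (String × Int)) : Int :=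
  ((tagged.filter (fun p => p.1 == tag)).map Prod.snd).sum

def get_urban_rural_count_per_code_alt (rows : List (String × Int)) (blocks_rural_classification : List (String × String)) : (List (String × Int)) × (List (String × Int)) :=
  match pvB_tag (PySem.Dict.ofList blocks_rural_classification) (pvB_cpb rows).items with
  | some tagged =>
      ([("U", pvB_sumTag "U" tagged), ("R", pvB_sumTag "R" tagged)], (pvB_cpb rows).items)
  | none => ([], [])

-- ===== PRECONDITION & SPEC =====
-- Pre_ excludes exactly the inputs where A raises KeyError: a row block missing from the
-- classification dict, or classified as something other than 'U'/'R'.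
def Pre_get_urban_rural_count_per_code (rows : List (String × Int)) (blocks_rural_classification : List (String × String)) : Prop :=
  ∀ p ∈ rows, (PySem.Dict.ofList blocks_rural_classification).get? p.1 = some "U" ∨
              (PySem.Dict.ofList blocks_rural_classification).get? p.1 = some "R"
instance (rows : List (String × Int)) (blocks_rural_classification : List (String × String)) : Decidable (Pre_get_urban_rural_count_per_code rows blocks_rural_classification) := by unfold Pre_get_urban_rural_count_per_code; infer_instance

def pvWitness_get_urban_rural_count_per_code : (List (String × Int)) × (List (String × String)) :=
  ([("a", 3), ("b", 2), ("a", 1)], [("a", "U"), ("b", "R")])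

def Spec_get_urban_rural_count_per_code (rows : List (String × Int)) (blocks_rural_classification : List (String × String)) (out : (List (String × Int)) × (List (String × Int))) : Prop := out = get_urban_rural_count_per_code_alt rows blocks_rural_classification
instance (rows : List (String × Int)) (blocks_rural_classification : List (String × String)) (out : (List (String × Int)) × (List (String × Int))) : Decidable (Spec_get_urban_rural_count_per_code rows blocks_rural_classification out) := by unfold Spec_get_urban_rural_count_per_code; infer_instance

-- ===== CLAIM (what is proved, stated in full; the proofs are below) =====
def Claim_equal_get_urban_rural_count_per_code : Prop := ∀ (rows : List (String × Int)) (blocks_rural_classification : List (String × String)), Dom_get_urban_rural_count_per_code rows blocks_rural_classification → Pre_get_urban_rural_count_per_code rows blocks_rural_classification → Spec_get_urban_rural_count_per_code rows blocks_rural_classification (get_urban_rural_count_per_code rows blocks_rural_classification)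


-- ===== LEMMAS AND PROOFS =====

-- the literal 'U'/'R' counts dict with variable values
def pvUR (u r : Int) : PySem.Dict String Int := PySem.Dict.mk [("U", u), ("R", r)]

lemma pvUR_ofList : PySem.Dict.ofList [("U", (0:Int)), ("R", 0)] = pvUR 0 0 := by decide

lemma pvUR_getU (u r : Int) : (pvUR u r).get? "U" = some u := by
  simp [pvUR, PySem.Dict.get?_mk_cons]

lemma pvUR_getR (u r : Int) : (pvUR u r).get? "R" = some r := by
  simp [pvUR, PySem.Dict.get?_mk_cons]

lemma pvUR_insU (u r x : Int) : (pvUR u r).insert "U" x = pvUR x r := by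
  apply PySem.Dict.ext
  rw [PySem.Dict.items_insert_of_contains]
  · simp [pvUR]
  · simp [pvUR]

lemma pvUR_insR (u r x : Int) : (pvUR u r).insert "R" x = pvUR u x := by
  apply PySem.Dict.ext
  rw [PySem.Dict.items_insert_of_contains]
  · simp [pvUR]
  · simp [pvUR]

-- per-tag sum of the counts belonging to blocks classified as t
def pvS (cls : PySem.Dict String String) (t : String) (xs : List (String × Int)) : Int :=
  ((xs.filter (fun p => cls.get? p.1 == some t)).map Prod.snd).sum

lemma pvS_nil (cls : PySem.Dict String String) (t : String) : pvS cls t [] = 0 := rfl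

lemma pvS_cons (cls : PySem.Dict String String) (t : String) (b : String) (c : Int)
    (xs : List (String × Int)) :
    pvS cls t ((b, c) :: xs) = (if cls.get? b = some t then c else 0) + pvS cls t xs := by
  simp [pvS, List.filter_cons]
  split_ifs with h <;> simp_all

lemma pvS_cons_eq (cls : PySem.Dict String String) (t b : String) (c : Int)
    (xs : List (String × Int)) (h : cls.get? b = some t) :
    pvS cls t ((b, c) :: xs) = c + pvS cls t xs := by
  rw [pvS_cons, if_pos h]

lemma pvS_cons_ne (cls : PySem.Dict String String) (t b : String) (c : Int)
    (xs : List (String × Int)) (h : cls.get? b ≠ some t) :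
    pvS cls t ((b, c) :: xs) = pvS cls t xs := by
  rw [pvS_cons, if_neg h, zero_add]

-- the per-block accumulation step (the body of both grouping loops)
def pvStep (d : PySem.Dict String Int) (p : String × Int) : PySem.Dict String Int :=
  d.insert p.1 (d.getD p.1 0 + p.2)

-- replacing the unique entry with key b by (b, v + c) adds c to the tag of b
lemma pvS_map_replace (cls : PySem.Dict String String) (t b : String) (c : Int) :
    ∀ (L : List (String × Int)) (v : Int), (L.map Prod.fst).Nodup → (b, v) ∈ L →
    pvS cls t (L.map (fun p => if p.1 == b then (b, v + c) else p)) =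
      pvS cls t L + (if cls.get? b = some t then c else 0) := by
  intro L
  induction L with
  | nil => intro v _ h; cases h
  | cons p rest ih =>
    rcases p with ⟨k, w⟩
    intro v hnd hmem
    rw [List.map_cons, List.nodup_cons] at hnd
    obtain ⟨hnotin, hnd2⟩ := hnd
    rcases List.mem_cons.mp hmem with h | h
    · obtain ⟨rfl, rfl⟩ := Prod.mk.inj h
      have hb : ∀ q ∈ rest, (q.1 == b) = false := by
        intro q hq
        simp only [beq_eq_false_iff_ne]
        intro he
        exact hnotin (by rw [← he]; exact List.mem_map.mpr ⟨q, hq, rfl⟩)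
      have hrest : rest.map (fun p => if p.1 == b then (b, v + c) else p) = rest.map id :=
        List.map_congr_left (fun q hq => by simp [hb q hq])
      rw [List.map_id] at hrest
      simp only [List.map_cons, beq_self_eq_true, if_pos, hrest]
      rw [pvS_cons, pvS_cons]
      split_ifs <;> omega
    · have hbmem : b ∈ rest.map Prod.fst := List.mem_map.mpr ⟨(b, v), h, rfl⟩
      have hp1 : (k == b) = false := by
        simp only [beq_eq_false_iff_ne]
        intro he
        exact hnotin (by rw [he]; exact hbmem)
      simp only [List.map_cons, hp1, Bool.false_eq_true, if_false]
      rw [pvS_cons, pvS_cons, ih v hnd2 h]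
      omega

lemma pvS_step (cls : PySem.Dict String String) (t : String) (d : PySem.Dict String Int)
    (b : String) (c : Int) (hnd : d.keys.Nodup) :
    pvS cls t (pvStep d (b, c)).items =
      pvS cls t d.items + (if cls.get? b = some t then c else 0) := by
  dsimp only [pvStep]
  by_cases hc : d.contains b = true
  · obtain ⟨v, hv⟩ : ∃ v, d.get? b = some v := by
      cases h : d.get? b with
      | none => exact absurd hc (by simp [(PySem.Dict.get?_eq_none_iff_contains d b).mp h])
      | some v => exact ⟨v, rfl⟩
    rw [PySem.Dict.getD_of_get?_eq_some d 0 hv, PySem.Dict.items_insert_of_contains d _ hc]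
    exact pvS_map_replace cls t b c d.items v hnd (PySem.Dict.mem_items_of_get?_eq_some d hv)
  · have hc' : d.contains b = false := by simpa using hc
    rw [PySem.Dict.items_insert_of_not_contains d _ hc', PySem.Dict.getD_of_not_contains d 0 hc']
    simp only [pvS, List.filter_append, List.map_append, List.sum_append, List.filter_cons,
      List.filter_nil]
    by_cases h : cls.get? b = some t <;> simp [h]

lemma nodup_keys_step (d : PySem.Dict String Int) (p : String × Int) (h : d.keys.Nodup) :
    (pvStep d p).keys.Nodup := by
  dsimp only [pvStep]
  by_cases hc : d.contains p.1 = true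
  · rw [PySem.Dict.keys_insert_of_contains d _ hc]; exact h
  · have hc' : d.contains p.1 = false := by simpa using hc
    rw [PySem.Dict.keys_insert_of_not_contains d _ hc']
    have hnm : p.1 ∉ d.keys := fun hm =>
      absurd ((PySem.Dict.contains_iff_mem_keys d p.1).mpr hm) (by simp [hc'])
    simp [List.nodup_append, h]
    exact fun a ha he => hnm (he ▸ ha)

-- grouping: per-tag sums are preserved by the per-block accumulation fold
lemma pvS_foldl (cls : PySem.Dict String String) (t : String) :
    ∀ (rows : List (String × Int)) (d : PySem.Dict String Int), d.keys.Nodup →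
    pvS cls t (rows.foldl pvStep d).items = pvS cls t d.items + pvS cls t rows := by
  intro rows
  induction rows with
  | nil => intro d _; simp [pvS_nil]
  | cons p rest ih =>
    intro d hnd
    rcases p with ⟨b, c⟩
    rw [List.foldl_cons, ih (pvStep d (b, c)) (nodup_keys_step d (b, c) hnd),
        pvS_step cls t d b c hnd, pvS_cons]
    omega

-- characterization of A's loop under Pre_
lemma pvA_loop_char (cls : PySem.Dict String String) :
    ∀ (rows : List (String × Int)) (u r : Int) (cpb : PySem.Dict String Int),
    (∀ p ∈ rows, cls.get? p.1 = some "U" ∨ cls.get? p.1 = some "R") →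
    pvA_loop cls rows (pvUR u r) cpb =
      some (pvUR (u + pvS cls "U" rows) (r + pvS cls "R" rows), rows.foldl pvStep cpb) := by
  intro rows
  induction rows with
  | nil => intro u r cpb _; simp [pvA_loop, pvS_nil]
  | cons p rest ih =>
    intro u r cpb hpre
    rcases p with ⟨b, c⟩
    have hrest : ∀ p ∈ rest, cls.get? p.1 = some "U" ∨ cls.get? p.1 = some "R" :=
      fun p hp => hpre p (List.mem_cons_of_mem _ hp)
    have hur : ("U" : String) ≠ "R" := by decide
    rcases hpre (b, c) List.mem_cons_self with h | h
    · simp only [pvA_loop, h, pvUR_getU, pvUR_insU]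
      rw [ih (u + c) r _ hrest, pvS_cons_eq cls "U" b c rest h,
          pvS_cons_ne cls "R" b c rest (by rw [h]; exact fun he => hur (Option.some.inj he)),
          List.foldl_cons, add_assoc]
      rfl
    · simp only [pvA_loop, h, pvUR_getR, pvUR_insR]
      rw [ih u (r + c) _ hrest, pvS_cons_eq cls "R" b c rest h,
          pvS_cons_ne cls "U" b c rest
            (by rw [h]; exact fun he => hur (Option.some.inj he).symm),
          List.foldl_cons, add_assoc]
      rfl

-- characterization of B's tagging + filtered sums
lemma pvB_tag_sum (cls : PySem.Dict String String) :
    ∀ (xs : List (String × Int)),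
    (∀ p ∈ xs, ∃ c, cls.get? p.1 = some c) →
    ∃ tagged, pvB_tag cls xs = some tagged ∧
      ∀ t, pvB_sumTag t tagged = pvS cls t xs := by
  intro xs
  induction xs with
  | nil => intro _; exact ⟨[], rfl, fun t => rfl⟩
  | cons p rest ih =>
    intro hall
    rcases p with ⟨b, v⟩
    obtain ⟨c, hc⟩ := hall (b, v) List.mem_cons_self
    obtain ⟨tagged, htag, hsum⟩ := ih (fun p hp => hall p (List.mem_cons_of_mem _ hp))
    refine ⟨(c, v) :: tagged, by simp [pvB_tag, hc, htag], fun t => ?_⟩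
    rw [pvS_cons, hc, ← hsum t]
    simp only [pvB_sumTag, List.filter_cons]
    by_cases h : c = t
    · subst h; simp
    · have hb : (c == t) = false := by simpa using h
      simp [hb, h]

-- every key of the grouped dict is a first component of some row
lemma cpb_keys_sub (rows : List (String × Int)) :
    ∀ k ∈ (pvB_cpb rows).keys, ∃ p ∈ rows, p.1 = k := by
  intro k hk
  have hkeys : (pvB_cpb rows).keys =
      PySem.Set.update (PySem.Dict.empty (κ := String) (ν := Int)).keys (rows.map Prod.fst) :=
    PySem.Dict.keys_foldl_insert_key rows Prod.fst _ _
  rw [hkeys, PySem.Dict.keys_empty, PySem.Set.update_nil_left] at hk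
  have : k ∈ rows.map Prod.fst := (PySem.Set.mem_ofList _ _).mp hk
  rcases List.mem_map.mp this with ⟨p, hp, hpk⟩
  exact ⟨p, hp, hpk⟩

-- ===== VERDICT (by name: the statements are the Claim_ definitions above) =====
theorem get_urban_rural_count_per_code_spec : Claim_equal_get_urban_rural_count_per_code := by
  intro rows cls _ hpre
  unfold Spec_get_urban_rural_count_per_code
  unfold get_urban_rural_count_per_code get_urban_rural_count_per_code_alt
  have hnd0 : (PySem.Dict.empty (κ := String) (ν := Int)).keys.Nodup := by
    rw [PySem.Dict.keys_empty]; exact List.nodup_nil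
  have hallItems : ∀ p ∈ (pvB_cpb rows).items, ∃ c, (PySem.Dict.ofList cls).get? p.1 = some c := by
    intro p hp
    rcases cpb_keys_sub rows p.1 (PySem.Dict.mem_keys_of_mem_items _ hp) with ⟨q, hq, hqk⟩
    rcases hpre q hq with h | h
    · exact ⟨"U", by rw [← hqk]; exact h⟩
    · exact ⟨"R", by rw [← hqk]; exact h⟩
  obtain ⟨tagged, htag, hsum⟩ := pvB_tag_sum (PySem.Dict.ofList cls) (pvB_cpb rows).items hallItems
  rw [pvUR_ofList, pvA_loop_char (PySem.Dict.ofList cls) rows 0 0 PySem.Dict.empty hpre]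
  show ((pvUR (0 + pvS (PySem.Dict.ofList cls) "U" rows)
        (0 + pvS (PySem.Dict.ofList cls) "R" rows)).items,
        (rows.foldl pvStep PySem.Dict.empty).items) = _
  rw [htag]
  have hU := pvS_foldl (PySem.Dict.ofList cls) "U" rows PySem.Dict.empty hnd0
  have hR := pvS_foldl (PySem.Dict.ofList cls) "R" rows PySem.Dict.empty hnd0
  have hcpb : pvB_cpb rows = rows.foldl pvStep PySem.Dict.empty := rfl
  dsimp only
  rw [hsum "U", hsum "R", hcpb, hU, hR]
  have h0 : ∀ t, pvS (PySem.Dict.ofList cls) t (PySem.Dict.empty (κ := String) (ν := Int)).items = 0 := fun t => rfl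
  simp only [h0, zero_add]
  rfl
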